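-- pv_equiv track=rewrite | github.com/Micheles111/Final-ASE-Project | services/match-service/app.py | find_capture_combination
-- ===== SOURCE A (Python) =====
-- import itertools
--
-- def get_card_value(card_id):
--     val = (card_id - 1) % 10 + 1
--     return val
--
-- def find_capture_combination(played_card_id, table_ids):
--     played_val = get_card_value(played_card_id)
--     target = 15 - played_val
--     if target <= 0: return []
--
--     table_map = {cid: get_card_value(cid) for cid in table_ids}
--     valid_combinations = []
--
--     for L in range(1, len(table_ids) + 1):
--         for subset in itertools.combinations(table_ids, L):
--             current_sum = sum(table_map[c] for c in subset)
--             if current_sum == target: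
--                 valid_combinations.append(list(subset))
--
--     if not valid_combinations: return []
--     valid_combinations.sort(key=len, reverse=True)
--     return valid_combinations[0]
-- ===== SOURCE B (Python) =====
-- def find_capture_combination(played_card_id, table_ids):
--     target = 15 - ((played_card_id - 1) % 10 + 1)
--     vals = [(c - 1) % 10 + 1 for c in table_ids]
--     # feas[i] = set of (s, c): some subset of table_ids[i:] has value-sum s (<= target) and size c
--     feas = [{(0, 0)}]
--     for v in reversed(vals):
--         prev = feas[0]
--         feas.insert(0, prev | {(s + v, c + 1) for (s, c) in prev if s + v <= target})
--     best = max((c for (s, c) in feas[0] if s == target), default=0)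
--     if best == 0:
--         return []
--     out = []
--     s, c = target, best
--     for cid, v, f in zip(table_ids, vals, feas[1:]):
--         if c > 0 and (s - v, c - 1) in f:
--             out.append(cid)
--             s -= v
--             c -= 1
--     return out
-- ===== Notes on version B (the rewrite author's own statement) =====
-- stated objective: faster
-- what changed: A enumerates all 2^n subsets of the table via itertools.combinations and stable-sorts the matches by length; B runs a bounded subset-sum DP over (sum, count) pairs per suffix and greedily reconstructs, left to right, the first maximum-length combination A would return.
import Mathlib
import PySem

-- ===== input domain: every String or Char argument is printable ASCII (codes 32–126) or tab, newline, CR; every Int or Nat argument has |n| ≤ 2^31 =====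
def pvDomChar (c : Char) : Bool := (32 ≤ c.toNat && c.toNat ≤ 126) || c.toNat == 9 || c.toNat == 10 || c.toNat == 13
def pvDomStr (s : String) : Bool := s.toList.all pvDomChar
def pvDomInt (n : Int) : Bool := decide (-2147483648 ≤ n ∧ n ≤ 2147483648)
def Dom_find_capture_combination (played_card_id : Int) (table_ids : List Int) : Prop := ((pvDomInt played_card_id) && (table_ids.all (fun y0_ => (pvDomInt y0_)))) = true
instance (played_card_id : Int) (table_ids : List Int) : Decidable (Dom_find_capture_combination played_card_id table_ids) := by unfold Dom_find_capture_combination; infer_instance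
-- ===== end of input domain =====

-- B replaces A's exponential subset enumeration by a polynomial subset-sum DP over (sum, count)
-- pairs per suffix with a greedy left-to-right reconstruction; objective: faster (asymptotic).


-- ===== PORT A =====
def get_card_value (card_id : Int) : Int := PySem.Int.mod (card_id - 1) 10 + 1

def find_capture_combination (played_card_id : Int) (table_ids : List Int) : List Int :=
  let played_val := get_card_value played_card_id
  let target := 15 - played_val
  if target ≤ 0 then []
  else
    let table_map : PySem.Dict Int Int :=
      table_ids.foldl (fun d cid => d.insert cid (get_card_value cid)) PySem.Dict.empty
    let valid_combinations : List (List Int) :=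
      (PySem.List.pyRange 1 (PySem.List.len table_ids + 1) 1).foldl (fun acc L =>
        (PySem.List.combinations table_ids L.toNat).foldl (fun acc2 subset =>
          -- table_map[c]: the key is always present (subset ⊆ table_ids), so getD is exact here
          if (subset.map (fun c => table_map.getD c 0)).sum = target then acc2 ++ [subset] else acc2)
          acc) []
    if valid_combinations = [] then []
    else (PySem.List.sorted valid_combinations (fun l => PySem.List.len l) true).headD []

-- ===== PORT B =====
def find_capture_combination_alt (played_card_id : Int) (table_ids : List Int) : List Int :=
  let target := 15 - (PySem.Int.mod (played_card_id - 1) 10 + 1)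
  let vals := table_ids.map (fun c => PySem.Int.mod (c - 1) 10 + 1)
  -- feas[i] = set of (s, c): some subset of table_ids[i:] has value-sum s (≤ target) and size c
  let feas : List (PySem.Set (Int × Int)) :=
    vals.foldr (fun v fs =>
      let prev := fs.headD []
      (PySem.Set.union prev ((prev.filter (fun p => p.1 + v ≤ target)).map
        (fun p => (p.1 + v, p.2 + 1)))) :: fs)
      [PySem.Set.ofList [(0, 0)]]
  let best := PySem.List.maxD (((feas.headD []).filter (fun p => p.1 = target)).map (fun p => p.2))
    (fun c => c) 0
  if best = 0 then []
  else
    ((table_ids.zip (vals.zip feas.tail)).foldl (fun st q =>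
        if 0 < st.2.2 ∧ (st.2.1 - q.2.1, st.2.2 - 1) ∈ q.2.2 then
          (st.1 ++ [q.1], st.2.1 - q.2.1, st.2.2 - 1)
        else st)
      (([] : List Int), target, best)).1

-- ===== PRECONDITION & SPEC =====
def Spec_find_capture_combination (played_card_id : Int) (table_ids : List Int) (out : List Int) : Prop := out = find_capture_combination_alt played_card_id table_ids
instance (played_card_id : Int) (table_ids : List Int) (out : List Int) : Decidable (Spec_find_capture_combination played_card_id table_ids out) := by unfold Spec_find_capture_combination; infer_instance

-- ===== CLAIM (what is proved, stated in full; the proofs are below) =====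
def Claim_equal_find_capture_combination : Prop := ∀ (played_card_id : Int) (table_ids : List Int), Dom_find_capture_combination played_card_id table_ids → Spec_find_capture_combination played_card_id table_ids (find_capture_combination played_card_id table_ids)

-- ===== LEMMAS AND PROOFS =====

-- value bounds
theorem gv_bounds (c : Int) : 1 ≤ get_card_value c ∧ get_card_value c ≤ 10 := by
  unfold get_card_value
  have h1 := PySem.Int.mod_nonneg (c - 1) (b := 10) (by norm_num)
  have h2 := PySem.Int.mod_lt (c - 1) (b := 10) (by norm_num)
  omega

-- the dict {cid: get_card_value(cid)} looks up get_card_value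
theorem table_map_getD (l : List Int) (d : PySem.Dict Int Int) (c : Int) :
    (l.foldl (fun d cid => d.insert cid (get_card_value cid)) d).getD c 0 =
      if c ∈ l then get_card_value c else d.getD c 0 := by
  induction l generalizing d with
  | nil => simp
  | cons x r ih =>
      simp only [List.foldl_cons, ih, PySem.Dict.getD_insert, List.mem_cons]
      by_cases hc : c ∈ r <;> by_cases hx : c = x <;> simp [hc, hx]

def pvStep (t v : Int) (fs : List (PySem.Set (Int × Int))) : List (PySem.Set (Int × Int)) :=
  let prev := fs.headD []
  (PySem.Set.union prev ((prev.filter (fun p => p.1 + v ≤ t)).map (fun p => (p.1 + v, p.2 + 1)))) :: fs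
def pvFeas (t : Int) (l : List Int) : List (PySem.Set (Int × Int)) :=
  (l.map get_card_value).foldr (pvStep t) [PySem.Set.ofList [(0, 0)]]
def pvF (t : Int) (l : List Int) : PySem.Set (Int × Int) := (pvFeas t l).headD []
theorem pvF_cons (t x : Int) (l : List Int) :
    pvF t (x :: l) = PySem.Set.union (pvF t l)
      (((pvF t l).filter (fun p => p.1 + get_card_value x ≤ t)).map
        (fun p => (p.1 + get_card_value x, p.2 + 1))) := rfl

theorem pvF_mem (t : Int) (ht : 0 ≤ t) (l : List Int) (s c : Int) :
    (s, c) ∈ pvF t l ↔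
      ∃ sub : List Int, sub.Sublist l ∧ (sub.map get_card_value).sum = s ∧
        (sub.length : Int) = c ∧ s ≤ t := by
  induction l generalizing s c with
  | nil =>
      constructor
      · intro h
        simp [pvF, pvFeas, PySem.Set.ofList] at h
        exact ⟨[], by simp, by simp [h.1], by simp [h.2.symm], by omega⟩
      · rintro ⟨sub, hsub, hsum, hlen, hst⟩
        have : sub = [] := List.sublist_nil.mp hsub
        subst this
        simp at hsum hlen
        simp [pvF, pvFeas, PySem.Set.ofList, ← hsum, ← hlen]
  | cons x r ih =>
      rw [pvF_cons, PySem.Set.mem_union]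
      constructor
      · rintro (h | h)
        · obtain ⟨sub, h1, h2, h3, h4⟩ := (ih _ _).mp h
          exact ⟨sub, h1.cons _, h2, h3, h4⟩
        · simp only [List.mem_map, List.mem_filter, decide_eq_true_eq] at h
          obtain ⟨⟨s', c'⟩, ⟨hmem, hle⟩, heq⟩ := h
          obtain ⟨sub, h1, h2, h3, h4⟩ := (ih s' c').mp hmem
          refine ⟨x :: sub, (List.cons_sublist_cons).mpr h1, ?_, ?_, ?_⟩
          · simp at heq ⊢; omega
          · simp at heq ⊢; omega
          · simp at heq ⊢; omega
      · rintro ⟨sub, hsub, hsum, hlen, hst⟩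
        rcases List.sublist_cons_iff.mp hsub with h | ⟨rsub, rfl, hr⟩
        · exact Or.inl ((ih _ _).mpr ⟨sub, h, hsum, hlen, hst⟩)
        · right
          simp only [List.mem_map, List.mem_filter, decide_eq_true_eq]
          have hgx := gv_bounds x
          refine ⟨((rsub.map get_card_value).sum, (rsub.length : Int)), ⟨?_, ?_⟩, ?_⟩
          · exact (ih _ _).mpr ⟨rsub, hr, rfl, rfl, by simp at hsum; omega⟩
          · simp at hsum; omega
          · simp at hsum hlen ⊢; omega

theorem pvF_zero_mem (t : Int) (ht : 0 ≤ t) (l : List Int) : ((0 : Int), (0 : Int)) ∈ pvF t l := by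
  rw [pvF_mem t ht]
  exact ⟨[], by simp, by simp, by simp, ht⟩

theorem pvF_count_zero (t : Int) (ht : 0 ≤ t) (l : List Int) (s : Int)
    (h : (s, (0 : Int)) ∈ pvF t l) : s = 0 := by
  rw [pvF_mem t ht] at h
  obtain ⟨sub, _, hsum, hlen, _⟩ := h
  have : sub = [] := by
    cases sub with
    | nil => rfl
    | cons a b => simp at hlen; omega
  simp [this] at hsum; omega

theorem pvFeas_head_tail (t : Int) (l : List Int) :
    pvFeas t l = pvF t l :: (pvFeas t l).tail := by
  cases l <;> rfl

theorem greedy_eq (t : Int) (ht : 0 ≤ t) (l : List Int) :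
    ∀ (out : List Int) (s c : Int), 0 ≤ c → (s, c) ∈ pvF t l →
    ((l.zip ((l.map get_card_value).zip (pvFeas t l).tail)).foldl (fun st q =>
        if 0 < st.2.2 ∧ (st.2.1 - q.2.1, st.2.2 - 1) ∈ q.2.2 then
          (st.1 ++ [q.1], st.2.1 - q.2.1, st.2.2 - 1)
        else st)
      (out, s, c)).1 =
    out ++ ((PySem.List.combinations l c.toNat).filter
      (fun ss => decide ((ss.map get_card_value).sum = s))).headD [] := by
  induction l with
  | nil =>
      intro out s c hc hmem
      have h0 : s = 0 ∧ c = 0 := by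
        simp [pvF, pvFeas, PySem.Set.ofList] at hmem; exact hmem
      obtain ⟨rfl, rfl⟩ := h0
      simp [PySem.List.combinations_zero]
  | cons x r ih =>
      intro out s c hc hmem
      have hgx := gv_bounds x
      have hst : s ≤ t := by
        obtain ⟨sub, -, -, -, h⟩ := (pvF_mem t ht _ s c).mp hmem
        exact h
      -- decompose the zip
      have hz : ((x :: r).zip (((x :: r).map get_card_value).zip (pvFeas t (x :: r)).tail)) =
          (x, (get_card_value x, pvF t r)) ::
            (r.zip ((r.map get_card_value).zip (pvFeas t r).tail)) := by
        rw [show (pvFeas t (x :: r)).tail = pvFeas t r from rfl, pvFeas_head_tail t r]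
        rfl
      rw [hz]
      simp only [List.foldl_cons]
      by_cases hc0 : c = 0
      · subst hc0
        have hs0 : s = 0 := pvF_count_zero t ht _ s hmem
        subst hs0
        rw [if_neg (by simp)]
        rw [ih out 0 0 le_rfl (pvF_zero_mem t ht r)]
        simp [PySem.List.combinations_zero]
      · have hcpos : 0 < c := by omega
        have hk : c.toNat = (c - 1).toNat + 1 := by omega
        rw [hk, PySem.List.combinations_cons_succ, List.filter_append, List.filter_map]
        have hfun : ((fun ss => decide (((ss : List Int).map get_card_value).sum = s)) ∘ (fun c => x :: c))
            = fun ss => decide ((ss.map get_card_value).sum = s - get_card_value x) := by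
          funext ss
          simp only [Function.comp_apply, List.map_cons, List.sum_cons]
          apply decide_eq_decide.mpr
          omega
        rw [hfun]
        set FL := (PySem.List.combinations r (c - 1).toNat).filter
          (fun ss => decide ((ss.map get_card_value).sum = s - get_card_value x)) with hFL
        by_cases hin : (s - get_card_value x, c - 1) ∈ pvF t r
        · rw [if_pos ⟨hcpos, hin⟩]
          rw [ih (out ++ [x]) (s - get_card_value x) (c - 1) (by omega) hin]
          have hFLne : FL ≠ [] := by
            obtain ⟨sub, hs1, hs2, hs3, _⟩ := (pvF_mem t ht r _ _).mp hin
            have : sub ∈ FL := by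
              rw [hFL]
              refine List.mem_filter.mpr ⟨?_, by simp [hs2]⟩
              exact (PySem.List.mem_combinations_iff r _ sub).mpr ⟨hs1, by omega⟩
            exact List.ne_nil_of_mem this
          obtain ⟨f0, ft, hFLc⟩ := List.exists_cons_of_ne_nil hFLne
          rw [← hFL, hFLc, List.map_cons, List.cons_append, List.headD_cons, List.headD_cons,
            List.append_assoc, List.singleton_append]
        · rw [if_neg (by rintro ⟨_, h⟩; exact hin h)]
          have hmem' : (s, c) ∈ pvF t r := by
            rw [pvF_cons, PySem.Set.mem_union] at hmem
            rcases hmem with h | h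
            · exact h
            · exfalso
              simp only [List.mem_map, List.mem_filter, decide_eq_true_eq] at h
              obtain ⟨⟨s', c'⟩, ⟨hm, _⟩, heq⟩ := h
              apply hin
              have h1 : s' = s - get_card_value x := by simp at heq; omega
              have h2 : c' = c - 1 := by simp at heq; omega
              rwa [h1, h2] at hm
          have := ih out s c hc hmem'
          rw [hk] at this
          rw [this]
          have hFLnil : FL = [] := by
            rw [hFL, List.filter_eq_nil_iff]
            intro sub hsub
            simp only [decide_eq_true_eq]
            intro hsum
            apply hin
            obtain ⟨h1, h2⟩ := (PySem.List.mem_combinations_iff r _ sub).mp hsub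
            exact (pvF_mem t ht r _ _).mpr ⟨sub, h1, hsum, by omega, by omega⟩
          rw [hFLnil, List.map_nil, List.nil_append]

def pvFM (key : List Int → Int) (xs : List (List Int)) : Option (List Int) :=
  xs.foldl (fun b x => match b with
    | none => some x
    | some m => if key m < key x then some x else some m) none

theorem head_insertBy (key : List Int → Int) (x : List Int) (acc : List (List Int)) :
    (PySem.List.insertBy (fun a b => decide (key b < key a)) x acc).head? =
      match acc.head? with
      | none => some x
      | some h => if key h < key x then some x else some h := by
  cases acc with
  | nil => rfl
  | cons h tl =>
      simp only [PySem.List.insertBy, List.head?_cons]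
      by_cases hlt : key h < key x
      · simp [hlt]
      · simp [hlt]

theorem foldl_insertBy_head (key : List Int → Int) (xs : List (List Int)) :
    ∀ acc : List (List Int),
    (xs.foldl (fun acc x => PySem.List.insertBy (fun a b => decide (key b < key a)) x acc) acc).head? =
      xs.foldl (fun b x => match b with
        | none => some x
        | some m => if key m < key x then some x else some m) acc.head? := by
  induction xs with
  | nil => intro acc; rfl
  | cons x r ih =>
      intro acc
      simp only [List.foldl_cons]
      rw [ih, head_insertBy]

theorem head_sorted_rev (key : List Int → Int) (xs : List (List Int)) :
    (PySem.List.sorted xs key true).headD [] = (pvFM key xs).getD [] := by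
  rw [PySem.List.sorted_rev_eq_foldl_insertBy, List.headD_eq_head?_getD,
    foldl_insertBy_head]
  rfl

theorem pvFM_lt (key : List Int → Int) (K : Int) (p : List (List Int)) (hp : ∀ y ∈ p, key y < K) :
    ∀ b : Option (List Int), (∀ m, b = some m → key m < K) →
    ∀ m', (p.foldl (fun b x => match b with
        | none => some x
        | some m => if key m < key x then some x else some m) b) = some m' → key m' < K := by
  induction p with
  | nil => intro b hb m' h; exact hb m' h
  | cons y r ih =>
      intro b hb m' h
      have hy : key y < K := hp y (by simp)
      refine ih (fun z hz => hp z (by simp [hz])) _ ?_ m' h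
      intro m hm
      cases b with
      | none => simp only at hm; cases hm; omega
      | some m0 =>
          have h0 : key m0 < K := hb m0 rfl
          simp only at hm
          by_cases hlt : key m0 < key y
          · rw [if_pos hlt] at hm; cases hm; omega
          · rw [if_neg hlt] at hm; cases hm; omega

theorem pvFM_const (key : List Int → Int) (K : Int) (q : List (List Int))
    (hK : ∀ z ∈ q, key z = K) :
    ∀ m, key m = K → (q.foldl (fun b x => match b with
        | none => some x
        | some m => if key m < key x then some x else some m) (some m)) = some m := by
  induction q with
  | nil => intro m _; rfl
  | cons z r ih =>
      intro m hm
      have hz : key z = K := hK z (by simp)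
      simp only [List.foldl_cons]
      have : ¬ key m < key z := by omega
      simp only [this, if_false]
      exact ih (fun w hw => hK w (by simp [hw])) m hm

theorem pvFM_grouped (key : List Int → Int) (K : Int) (p q : List (List Int)) (hq : q ≠ [])
    (hK : ∀ z ∈ q, key z = K) (hp : ∀ y ∈ p, key y < K) :
    pvFM key (p ++ q) = q.head? := by
  obtain ⟨z0, zt, rfl⟩ := List.exists_cons_of_ne_nil hq
  unfold pvFM
  rw [List.foldl_append, List.foldl_cons]
  have hz0 : key z0 = K := hK z0 (by simp)
  have hfirst : ((p.foldl (fun b x => match b with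
      | none => some x
      | some m => if key m < key x then some x else some m) none)) = none ∨
      ∃ m, (p.foldl (fun b x => match b with
      | none => some x
      | some m => if key m < key x then some x else some m) none) = some m ∧ key m < K := by
    cases hfold : (p.foldl (fun b x => match b with
      | none => some x
      | some m => if key m < key x then some x else some m) none) with
    | none => exact Or.inl rfl
    | some m =>
        exact Or.inr ⟨m, rfl, pvFM_lt key K p hp none (by simp) m hfold⟩
  rcases hfirst with h | ⟨m, h, hmK⟩ <;> rw [h]
  · simp only [List.head?_cons]
    exact pvFM_const key K zt (fun w hw => hK w (by simp [hw])) z0 hz0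
  · simp only []
    have : key m < key z0 := by omega
    simp only [this, if_true]
    simp only [List.head?_cons]
    exact pvFM_const key K zt (fun w hw => hK w (by simp [hw])) z0 hz0


-- ----- assembling the two ports into canonical forms -----
def pvGroup (t : Int) (l : List Int) (L : Int) : List (List Int) :=
  (PySem.List.combinations l L.toNat).filter (fun ss => decide ((ss.map get_card_value).sum = t))

theorem validA_eq (t : Int) (l : List Int) (tm : PySem.Dict Int Int)
    (htm : ∀ c ∈ l, tm.getD c 0 = get_card_value c) :
    ((PySem.List.pyRange 1 (PySem.List.len l + 1) 1).foldl (fun acc L =>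
        (PySem.List.combinations l L.toNat).foldl (fun acc2 subset =>
          if (subset.map (fun c => tm.getD c 0)).sum = t then acc2 ++ [subset] else acc2)
          acc) []) =
      (PySem.List.pyRange 1 ((l.length : Int) + 1) 1).flatMap (pvGroup t l) := by
  have hfun : (fun (acc : List (List Int)) (L : Int) =>
      (PySem.List.combinations l L.toNat).foldl (fun acc2 subset =>
          if (subset.map (fun c => tm.getD c 0)).sum = t then acc2 ++ [subset] else acc2) acc)
      = fun acc L => acc ++ pvGroup t l L := by
    funext acc L
    rw [PySem.List.foldl_append_ite_eq_filter]
    unfold pvGroup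
    congr 1
    apply List.filter_congr
    intro ss hss
    obtain ⟨hsub, -⟩ := (PySem.List.mem_combinations_iff l _ ss).mp hss
    have hmap : ss.map (fun c => tm.getD c 0) = ss.map get_card_value :=
      List.map_congr_left (fun c hc => htm c (hsub.subset hc))
    rw [hmap]
  rw [hfun, PySem.List.foldl_append_eq_flatMap, List.nil_append, PySem.List.len_eq]

theorem portA_eq (pid : Int) (l : List Int) :
    find_capture_combination pid l =
      (if (PySem.List.pyRange 1 ((l.length : Int) + 1) 1).flatMap
            (pvGroup (15 - get_card_value pid) l) = [] then []
       else (PySem.List.sorted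
          ((PySem.List.pyRange 1 ((l.length : Int) + 1) 1).flatMap
            (pvGroup (15 - get_card_value pid) l))
          (fun ss => PySem.List.len ss) true).headD []) := by
  have hgt : ¬ (15 - get_card_value pid ≤ 0) := by
    have := gv_bounds pid; omega
  unfold find_capture_combination
  simp only []
  rw [if_neg hgt]
  rw [validA_eq (15 - get_card_value pid) l _ (fun c hc => by
    rw [table_map_getD, if_pos hc])]

def pvCs (t : Int) (l : List Int) : List Int :=
  ((pvF t l).filter (fun p => decide (p.1 = t))).map Prod.snd

theorem portB_eq (pid : Int) (l : List Int) :
    find_capture_combination_alt pid l =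
      (if PySem.List.maxD (pvCs (15 - get_card_value pid) l) (fun c => c) 0 = 0 then []
       else ((l.zip ((l.map get_card_value).zip
            (pvFeas (15 - get_card_value pid) l).tail)).foldl (fun st q =>
          if 0 < st.2.2 ∧ (st.2.1 - q.2.1, st.2.2 - 1) ∈ q.2.2 then
            (st.1 ++ [q.1], st.2.1 - q.2.1, st.2.2 - 1)
          else st)
        (([] : List Int), 15 - get_card_value pid,
          PySem.List.maxD (pvCs (15 - get_card_value pid) l) (fun c => c) 0)).1) := by
  unfold find_capture_combination_alt
  rfl

-- membership in the candidate-count list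
theorem mem_pvCs (t : Int) (l : List Int) (c : Int) :
    c ∈ pvCs t l ↔ (t, c) ∈ pvF t l := by
  unfold pvCs
  constructor
  · rintro h
    obtain ⟨⟨a, b⟩, hm, rfl⟩ := List.mem_map.mp h
    obtain ⟨hmem, ha⟩ := List.mem_filter.mp hm
    have : a = t := by simpa using ha
    subst this
    exact hmem
  · intro h
    exact List.mem_map.mpr ⟨(t, c), List.mem_filter.mpr ⟨h, by simp⟩, rfl⟩

theorem pvCs_pos (t : Int) (ht : 0 < t) (l : List Int) (c : Int) (h : c ∈ pvCs t l) : 1 ≤ c := by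
  rw [mem_pvCs] at h
  rw [pvF_mem t (by omega) l] at h
  obtain ⟨sub, -, hsum, hlen, -⟩ := h
  cases sub with
  | nil => simp at hsum; omega
  | cons a b => simp at hlen; omega

-- groups are nonempty exactly on DP-feasible counts
theorem pvGroup_ne_nil (t : Int) (ht : 0 ≤ t) (l : List Int) (c : Int) (hc : 0 ≤ c) :
    pvGroup t l c ≠ [] ↔ (t, c) ∈ pvF t l := by
  constructor
  · intro h
    obtain ⟨ss, hss⟩ := List.exists_mem_of_ne_nil _ h
    obtain ⟨hmem, hsum⟩ := List.mem_filter.mp hss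
    obtain ⟨hsub, hlen⟩ := (PySem.List.mem_combinations_iff l _ ss).mp hmem
    refine (pvF_mem t ht l _ _).mpr ⟨ss, hsub, by simpa using hsum, by omega, ?_⟩
    have : (ss.map get_card_value).sum = t := by simpa using hsum
    omega
  · intro h
    obtain ⟨sub, h1, h2, h3, -⟩ := (pvF_mem t ht l _ _).mp h
    apply List.ne_nil_of_mem (a := sub)
    exact List.mem_filter.mpr
      ⟨(PySem.List.mem_combinations_iff l _ sub).mpr ⟨h1, by omega⟩, by simp [h2]⟩

-- ===== VERDICT (by name: the statement is the Claim_ definition above) =====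
theorem find_capture_combination_spec : Claim_equal_find_capture_combination := by
  intro pid l _
  unfold Spec_find_capture_combination
  rw [portA_eq, portB_eq]
  have hgv := gv_bounds pid
  set t := 15 - get_card_value pid with ht_def
  have ht5 : 5 ≤ t := by omega
  have ht0 : 0 ≤ t := by omega
  set n : Int := (l.length : Int) with hn_def
  set best := PySem.List.maxD (pvCs t l) (fun c => c) 0 with hbest_def
  by_cases hb0 : best = 0
  · -- no capture exists: both return []
    rw [if_pos hb0]
    have hcs : pvCs t l = [] := by
      by_contra hne
      cases hmax : PySem.List.max? (pvCs t l) (fun c => c) with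
      | none => exact hne ((PySem.List.max?_eq_none_iff _ _).mp hmax)
      | some m =>
          have hm : m ∈ pvCs t l := PySem.List.max?_mem hmax
          have : best = m := by rw [hbest_def]; unfold PySem.List.maxD; rw [hmax]; rfl
          have := pvCs_pos t (by omega) l m hm
          omega
    have hvalid : (PySem.List.pyRange 1 (n + 1) 1).flatMap (pvGroup t l) = [] := by
      rw [List.flatMap_eq_nil_iff]
      intro L hL
      obtain ⟨hL1, hL2⟩ := PySem.List.mem_pyRange_one.mp hL
      by_contra hne
      have := (pvGroup_ne_nil t ht0 l L (by omega)).mp hne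
      have := (mem_pvCs t l L).mpr this
      rw [hcs] at this
      simp at this
    rw [if_pos hvalid]
  · -- a capture exists
    rw [if_neg hb0]
    -- best is the maximal feasible count
    have hcs_ne : pvCs t l ≠ [] := by
      intro h
      apply hb0
      rw [hbest_def]
      unfold PySem.List.maxD
      rw [(PySem.List.max?_eq_none_iff _ _).mpr h]
      rfl
    obtain ⟨m, hmax⟩ : ∃ m, PySem.List.max? (pvCs t l) (fun c => c) = some m := by
      cases hmax : PySem.List.max? (pvCs t l) (fun c => c) with
      | none => exact absurd ((PySem.List.max?_eq_none_iff _ _).mp hmax) hcs_ne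
      | some m => exact ⟨m, rfl⟩
    have hbm : best = m := by rw [hbest_def]; unfold PySem.List.maxD; rw [hmax]; rfl
    have hbest_mem : (t, best) ∈ pvF t l := (mem_pvCs t l best).mp (hbm ▸ PySem.List.max?_mem hmax)
    have hbest_max : ∀ c, (t, c) ∈ pvF t l → c ≤ best := by
      intro c hc
      have := PySem.List.max?_isMax hmax c ((mem_pvCs t l c).mpr hc)
      omega
    have hbest1 : 1 ≤ best := pvCs_pos t (by omega) l best (hbm ▸ PySem.List.max?_mem hmax)
    have hbestn : best ≤ n := by
      obtain ⟨sub, h1, -, h3, -⟩ := (pvF_mem t ht0 l _ _).mp hbest_mem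
      have := h1.length_le
      rw [hn_def]
      omega
    -- the A-side list of valid combinations, grouped
    have hsplit1 : PySem.List.pyRange 1 (n + 1) 1 =
        PySem.List.pyRange 1 (best + 1) 1 ++ PySem.List.pyRange (best + 1) (n + 1) 1 :=
      PySem.List.pyRange_one_append 1 (best + 1) (n + 1) (by omega) (by omega)
    have hsplit2 : PySem.List.pyRange 1 (best + 1) 1 =
        PySem.List.pyRange 1 best 1 ++ [best] :=
      PySem.List.pyRange_one_succ_right (by omega)
    have hhigh : (PySem.List.pyRange (best + 1) (n + 1) 1).flatMap (pvGroup t l) = [] := by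
      rw [List.flatMap_eq_nil_iff]
      intro L hL
      obtain ⟨hL1, hL2⟩ := PySem.List.mem_pyRange_one.mp hL
      by_contra hne
      have := hbest_max L ((pvGroup_ne_nil t ht0 l L (by omega)).mp hne)
      omega
    have hvalid_eq : (PySem.List.pyRange 1 (n + 1) 1).flatMap (pvGroup t l) =
        (PySem.List.pyRange 1 best 1).flatMap (pvGroup t l) ++ pvGroup t l best := by
      rw [hsplit1, List.flatMap_append, hhigh, List.append_nil, hsplit2,
        List.flatMap_append]
      simp
    have hq_ne : pvGroup t l best ≠ [] := (pvGroup_ne_nil t ht0 l best (by omega)).mpr hbest_mem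
    have hvalid_ne : (PySem.List.pyRange 1 (n + 1) 1).flatMap (pvGroup t l) ≠ [] := by
      rw [hvalid_eq]
      intro h
      exact hq_ne (List.append_eq_nil_iff.mp h).2
    rw [if_neg hvalid_ne]
    -- head of the stable reverse sort = head of the best-length group
    have hkeyq : ∀ z ∈ pvGroup t l best, PySem.List.len z = best := by
      intro z hz
      obtain ⟨hmem, -⟩ := List.mem_filter.mp hz
      obtain ⟨-, hlen⟩ := (PySem.List.mem_combinations_iff l _ z).mp hmem
      rw [PySem.List.len_eq, hlen]
      omega
    have hkeyp : ∀ y ∈ (PySem.List.pyRange 1 best 1).flatMap (pvGroup t l),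
        PySem.List.len y < best := by
      intro y hy
      obtain ⟨L, hL, hyL⟩ := List.mem_flatMap.mp hy
      obtain ⟨hL1, hL2⟩ := PySem.List.mem_pyRange_one.mp hL
      obtain ⟨hmem, -⟩ := List.mem_filter.mp hyL
      obtain ⟨-, hlen⟩ := (PySem.List.mem_combinations_iff l _ y).mp hmem
      rw [PySem.List.len_eq, hlen]
      omega
    rw [hvalid_eq, head_sorted_rev,
      pvFM_grouped (fun ss => PySem.List.len ss) best _ _ hq_ne hkeyq hkeyp]
    -- B side: greedy reconstruction
    rw [greedy_eq t ht0 l [] t best (by omega) hbest_mem]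
    rw [List.nil_append]
    unfold pvGroup
    rw [List.headD_eq_head?_getD]
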